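-- pv_equiv track=rewrite | github.com/Ryzhtus/master-thesis | named_entity_recognition/reader_document.py | make_sentence_mask
-- ===== SOURCE A (Python) =====
-- def make_sentence_mask(document, counter):
--     masks = []
--     for sentence in document:
--         sentence_mask = [-1 for x in range(len(sentence))]
--         for key in list(counter.keys()):
--             entity = key
--             window_size = len(entity.split(' '))
--             for window_start in range(0, len(sentence) - window_size):
--                 if ' '.join(sentence[window_start: window_start + window_size]) == entity:
--                     for idx in range(window_start, window_start + window_size):
--                         sentence_mask[idx] = 1
--         masks.append(sentence_mask)
--
--     return masks
-- ===== SOURCE B (Python) =====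
-- def make_sentence_mask(document, counter):
--     # window-major rewrite: one dict lookup per window per DISTINCT window size,
--     # instead of one window scan per entity
--     size_of = {key: len(key.split(' ')) for key in counter}
--     sizes = []
--     for w in size_of.values():
--         if w not in sizes:
--             sizes.append(w)
--     masks = []
--     for sentence in document:
--         n = len(sentence)
--         mask = [-1] * n
--         for w in sizes:
--             for start in range(n - w):
--                 if size_of.get(' '.join(sentence[start:start + w])) == w:
--                     mask[start:start + w] = [1] * w
--         masks.append(mask)
--     return masks
-- ===== Notes on version B (the rewrite author's own statement) =====
-- stated objective: faster
-- what changed: A scans every window position once per entity (entities x positions); B builds a size dictionary once, then slides each DISTINCT window size over the sentence a single time, deciding a window by one dict lookup, so all entities of the same token-count share one pass.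
import Mathlib
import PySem

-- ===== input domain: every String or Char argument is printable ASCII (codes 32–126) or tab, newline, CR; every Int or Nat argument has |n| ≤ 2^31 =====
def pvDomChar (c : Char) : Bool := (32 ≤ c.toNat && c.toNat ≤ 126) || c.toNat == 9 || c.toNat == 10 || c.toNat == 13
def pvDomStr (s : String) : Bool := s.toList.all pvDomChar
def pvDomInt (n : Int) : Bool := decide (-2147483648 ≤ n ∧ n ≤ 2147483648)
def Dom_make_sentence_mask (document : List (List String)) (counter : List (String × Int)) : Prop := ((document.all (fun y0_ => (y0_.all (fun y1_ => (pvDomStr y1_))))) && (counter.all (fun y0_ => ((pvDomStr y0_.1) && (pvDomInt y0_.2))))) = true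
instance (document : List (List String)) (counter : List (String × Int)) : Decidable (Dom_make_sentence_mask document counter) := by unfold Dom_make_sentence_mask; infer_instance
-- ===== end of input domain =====

-- B rewrites A window-major: one size dict lookup per window per DISTINCT window size,
-- instead of one scan over all windows per entity; same return value, proved below.

-- len(key.split(' ')) — shared helper of both ports
def pvSz (key : String) : Nat := ((PySem.Str.split? key " ").getD []).length

-- ===== PORT A =====
def make_sentence_mask (document : List (List String)) (counter : List (String × Int)) : List (List Int) :=
  document.foldl (fun masks sentence =>
    let sentence_mask : List Int :=
      (PySem.List.pyRange 0 (sentence.length : Int) 1).map (fun _ => (-1 : Int))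
    let sentence_mask :=
      (PySem.Dict.ofList counter).keys.foldl (fun mask key =>
        (PySem.List.pyRange 0 ((sentence.length : Int) - (pvSz key : Int)) 1).foldl (fun mask ws =>
          if PySem.Str.join " " (PySem.List.slice sentence (some ws) (some (ws + (pvSz key : Int)))) == key then
            (PySem.List.pyRange ws (ws + (pvSz key : Int)) 1).foldl
              (fun mask idx => PySem.List.pySetD mask idx 1) mask
          else mask) mask) sentence_mask
    masks ++ [sentence_mask]) []

-- ===== PORT B =====
def make_sentence_mask_alt (document : List (List String)) (counter : List (String × Int)) : List (List Int) :=
  let sizeOf : PySem.Dict String Int :=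
    (PySem.Dict.ofList counter).keys.foldl (fun d key => d.insert key (pvSz key : Int)) PySem.Dict.empty
  let sizes : List Int := PySem.Set.ofList sizeOf.values  -- the 'if w not in sizes: sizes.append(w)' loop
  document.foldl (fun masks sentence =>
    let mask0 : List Int := PySem.List.pyRepeat [(-1 : Int)] (sentence.length : Int)
    let mask :=
      sizes.foldl (fun mask w =>
        (PySem.List.pyRange 0 ((sentence.length : Int) - w) 1).foldl (fun mask start =>
          if PySem.Dict.get? sizeOf (PySem.Str.join " " (PySem.List.slice sentence (some start) (some (start + w)))) == some w then
            -- mask[start:start+w] = [1]*w  (slice assignment, replacement length = slice length)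
            PySem.List.slice mask none (some start) ++ PySem.List.pyRepeat [(1 : Int)] w ++
              PySem.List.slice mask (some (start + w)) none
          else mask) mask) mask0
    masks ++ [mask]) []

-- ===== PRECONDITION & SPEC =====
def Spec_make_sentence_mask (document : List (List String)) (counter : List (String × Int)) (out : List (List Int)) : Prop := out = make_sentence_mask_alt document counter
instance (document : List (List String)) (counter : List (String × Int)) (out : List (List Int)) : Decidable (Spec_make_sentence_mask document counter out) := by unfold Spec_make_sentence_mask; infer_instance

-- ===== CLAIM (what is proved, stated in full; the proofs are below) =====
def Claim_equal_make_sentence_mask : Prop := ∀ (document : List (List String)) (counter : List (String × Int)), Dom_make_sentence_mask document counter → Spec_make_sentence_mask document counter (make_sentence_mask document counter)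

-- ===== LEMMAS AND PROOFS =====

-- pointwise mask: entry i is 1 where q i, else -1; both per-sentence loops compute one of these
def pvPm (n : Nat) (q : Nat → Bool) : List Int :=
  (List.range n).map (fun i => if q i then (1 : Int) else -1)

-- does the window of size (pvSz k) starting at token a spell out key k?
def pvMatch (s : List String) (k : String) (a : Nat) : Bool :=
  PySem.Str.join " " ((s.drop a).take (pvSz k)) == k

-- position i is covered by a match of key k at a start A's loop visits (a + w < n)
def pvCoverKey (s : List String) (k : String) (i : Nat) : Bool :=
  (List.range s.length).any (fun a =>
    decide (a + pvSz k < s.length ∧ a ≤ i ∧ i < a + pvSz k) && pvMatch s k a)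

def pvCovers (s : List String) (counter : List (String × Int)) (i : Nat) : Bool :=
  (PySem.Dict.ofList counter).keys.any (fun k => pvCoverKey s k i)

-- B's entity-size dictionary and its per-size cover predicate
def pvSizeOf (counter : List (String × Int)) : PySem.Dict String Int :=
  (PySem.Dict.ofList counter).keys.foldl (fun d key => d.insert key (pvSz key : Int)) PySem.Dict.empty

def pvCoverSize (counter : List (String × Int)) (s : List String) (w : Nat) (i : Nat) : Bool :=
  (List.range s.length).any (fun a =>
    decide (a + w < s.length ∧ a ≤ i ∧ i < a + w) &&
      (PySem.Dict.get? (pvSizeOf counter) (PySem.Str.join " " ((s.drop a).take w)) == some (w : Int)))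

lemma pvPm_length (n : Nat) (q : Nat → Bool) : (pvPm n q).length = n := by simp [pvPm]

lemma pvPm_getElem {n : Nat} (q : Nat → Bool) {i : Nat} (h : i < (pvPm n q).length) :
    (pvPm n q)[i] = if q i then (1:Int) else -1 := by
  simp [pvPm]

lemma pvPm_congr {n : Nat} {q q' : Nat → Bool} (h : ∀ i, i < n → q i = q' i) :
    pvPm n q = pvPm n q' := by
  unfold pvPm
  exact List.map_congr_left (fun i hi => by rw [h i (List.mem_range.mp hi)])

lemma pvPm_set {n : Nat} (q : Nat → Bool) {j : Nat} (_hj : j < n) :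
    (pvPm n q).set j 1 = pvPm n (fun i => q i || decide (i = j)) := by
  apply List.ext_getElem
  · simp [pvPm]
  · intro i h1 h2
    simp only [pvPm, List.getElem_set, List.getElem_map, List.getElem_range] at *
    by_cases hij : i = j
    · simp [hij]
    · simp only [hij, decide_false, Bool.or_false, if_neg (fun hh => hij (Eq.symm hh))]

-- A's inner marking loop 'for idx in range(a, a+w): mask[idx] = 1' on a pointwise mask
lemma pvMarkInt {s : List String} (w a : Nat) (q : Nat → Bool) (h : a + w ≤ s.length) :
    (PySem.List.pyRange (a : Int) ((a : Int) + (w : Int)) 1).foldl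
      (fun mask idx => PySem.List.pySetD mask idx 1) (pvPm s.length q)
    = pvPm s.length (fun i => q i || decide (a ≤ i ∧ i < a + w)) := by
  induction w generalizing q with
  | zero =>
      rw [show ((a:Int) + ((0:Nat):Int) = (a:Int)) by push_cast; ring, PySem.List.pyRange_one_eq_nil le_rfl]
      exact pvPm_congr (fun i _ => by simp)
  | succ w ih =>
      rw [show ((a:Int) + (((w+1):Nat):Int) = ((a:Int) + (w:Int)) + 1) by push_cast; ring,
        PySem.List.pyRange_one_succ_right (by omega)]
      rw [List.foldl_append]
      rw [ih q (by omega)]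
      simp only [List.foldl_cons, List.foldl_nil]
      rw [show ((a:Int) + (w:Int)) = (((a+w : Nat)):Int) by push_cast; ring,
        PySem.List.pySetD_natCast, pvPm_set _ (by omega)]
      exact pvPm_congr (fun i _ => by
        cases h1 : q i
        · simp only [Bool.false_or]
          rw [Bool.eq_iff_iff]
          simp only [Bool.or_eq_true, decide_eq_true_eq]
          omega
        · simp)

-- B's slice assignment 'mask[a:a+w] = [1]*w' on a pointwise mask
lemma pvMarkSlice {s : List String} (w a : Nat) (q : Nat → Bool) (h : a + w ≤ s.length) :
    PySem.List.slice (pvPm s.length q) none (some (a : Int)) ++ List.replicate w (1 : Int) ++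
      PySem.List.slice (pvPm s.length q) (some ((a : Int) + (w : Int))) none
    = pvPm s.length (fun i => q i || decide (a ≤ i ∧ i < a + w)) := by
  rw [PySem.List.slice_to_natCast, show ((a:Int) + (w:Int)) = (((a+w:Nat)):Int) by push_cast; ring,
    PySem.List.slice_from_natCast]
  have hmin : min a s.length = a := by omega
  apply List.ext_getElem
  · simp [pvPm]; omega
  · intro i h1 h2
    simp only [pvPm_length] at h2
    by_cases hlt : i < a
    · rw [List.getElem_append_left (by simp [pvPm, hmin]; omega)]
      rw [List.getElem_append_left (by simp [pvPm, hmin]; omega)]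
      simp only [List.getElem_take, pvPm_getElem]
      have : ¬(a ≤ i ∧ i < a + w) := by omega
      simp [this]
    · by_cases hlt2 : i < a + w
      · rw [List.getElem_append_left (by simp [pvPm, hmin]; omega)]
        rw [List.getElem_append_right (by simp [pvPm, hmin]; omega)]
        simp only [List.getElem_replicate, pvPm_getElem]
        have : (a ≤ i ∧ i < a + w) := by omega
        simp [this]
      · rw [List.getElem_append_right (by simp [pvPm, hmin]; omega)]
        simp only [List.length_append, List.length_take, List.length_replicate, pvPm_length,
          hmin, List.getElem_drop, pvPm_getElem]
        have heq : a + w + (i - (a + w)) = i := by omega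
        rw [heq]
        have hna : ¬(a ≤ i ∧ i < a + w) := by omega
        simp [hna]

-- generic window loop over Nat starts 0..m-1: 'for a in range(m): if c a then mark window a'
lemma pvLoopGen {s : List String} (w : Nat) (c : Nat → Bool) (f : List Int → Int → List Int)
    (hf : ∀ q (a : Nat), a + w ≤ s.length →
      f (pvPm s.length q) (a : Int)
        = pvPm s.length (fun i => q i || (decide (a ≤ i ∧ i < a + w) && c a)))
    (m : Nat) (q : Nat → Bool) (hm : m + w ≤ s.length) :
    (List.range m).foldl (fun mask (a : Nat) => f mask (a : Int)) (pvPm s.length q)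
    = pvPm s.length (fun i => q i || (List.range m).any (fun a => decide (a ≤ i ∧ i < a + w) && c a)) := by
  induction m generalizing q with
  | zero => exact pvPm_congr (fun i _ => by simp)
  | succ m ih =>
      rw [List.range_succ, List.foldl_append, ih q (by omega)]
      simp only [List.foldl_cons, List.foldl_nil]
      rw [hf _ m (by omega)]
      exact pvPm_congr (fun i _ => by simp [Bool.or_assoc])

-- the Int-level loop A and B actually run: 'for a in range(0, n - w)'
lemma pvStepGen {s : List String} (w : Nat) (c : Nat → Bool) (f : List Int → Int → List Int)
    (hf : ∀ q (a : Nat), a + w ≤ s.length →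
      f (pvPm s.length q) (a : Int)
        = pvPm s.length (fun i => q i || (decide (a ≤ i ∧ i < a + w) && c a)))
    (q : Nat → Bool) :
    (PySem.List.pyRange 0 ((s.length : Int) - (w : Int)) 1).foldl f (pvPm s.length q)
    = pvPm s.length (fun i => q i ||
        (List.range s.length).any (fun a => decide (a + w < s.length ∧ a ≤ i ∧ i < a + w) && c a)) := by
  by_cases hw : w ≤ s.length
  · rw [show ((s.length : Int) - (w : Int)) = (((s.length - w : Nat)) : Int) by push_cast [hw]; ring,
      PySem.List.pyRange_zero_natCast, List.foldl_map,
      pvLoopGen w c f hf (s.length - w) q (by omega)]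
    exact pvPm_congr (fun i _ => by
      rw [Bool.eq_iff_iff]
      simp only [Bool.or_eq_true, List.any_eq_true, List.mem_range, Bool.and_eq_true,
        decide_eq_true_eq]
      constructor
      · rintro (hq | ⟨a, ha, ⟨h1, h2⟩, hc⟩)
        · exact Or.inl hq
        · exact Or.inr ⟨a, by omega, ⟨by omega, h1, h2⟩, hc⟩
      · rintro (hq | ⟨a, ha, ⟨h0, h1, h2⟩, hc⟩)
        · exact Or.inl hq
        · exact Or.inr ⟨a, by omega, ⟨h1, h2⟩, hc⟩)
  · rw [PySem.List.pyRange_one_eq_nil (by omega)]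
    exact pvPm_congr (fun i _ => by
      rw [Bool.eq_iff_iff]
      simp only [Bool.or_eq_true, List.any_eq_true, List.mem_range, Bool.and_eq_true,
        decide_eq_true_eq]
      constructor
      · exact Or.inl
      · rintro (hq | ⟨a, ha, ⟨h0, h1, h2⟩, hc⟩)
        · exact hq
        · omega)

-- A's per-key pass marks exactly pvCoverKey
lemma pvStepKeyA (s : List String) (k : String) (q : Nat → Bool) :
    (PySem.List.pyRange 0 ((s.length : Int) - (pvSz k : Int)) 1).foldl (fun mask ws =>
      if PySem.Str.join " " (PySem.List.slice s (some ws) (some (ws + (pvSz k : Int)))) == k then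
        (PySem.List.pyRange ws (ws + (pvSz k : Int)) 1).foldl
          (fun mask idx => PySem.List.pySetD mask idx 1) mask
      else mask) (pvPm s.length q)
    = pvPm s.length (fun i => q i || pvCoverKey s k i) := by
  rw [pvStepGen (pvSz k) (pvMatch s k) _ ?_ q]
  · rfl
  · intro q a ha
    rw [PySem.List.slice_natCast_add]
    unfold pvMatch
    by_cases hc : PySem.Str.join " " (List.take (pvSz k) (List.drop a s)) == k
    · rw [if_pos hc, pvMarkInt (pvSz k) a q ha]
      exact pvPm_congr (fun i _ => by simp [hc])
    · rw [if_neg (by simpa using hc)]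
      exact pvPm_congr (fun i _ => by simp [Bool.eq_false_iff.mpr hc])

-- B's per-size pass marks exactly pvCoverSize
lemma pvStepSizeB (counter : List (String × Int)) (s : List String) (w : Nat) (q : Nat → Bool) :
    (PySem.List.pyRange 0 ((s.length : Int) - (w : Int)) 1).foldl (fun mask start =>
      if PySem.Dict.get? (pvSizeOf counter)
          (PySem.Str.join " " (PySem.List.slice s (some start) (some (start + (w : Int))))) == some (w : Int) then
        PySem.List.slice mask none (some start) ++ PySem.List.pyRepeat [(1 : Int)] (w : Int) ++
          PySem.List.slice mask (some (start + (w : Int))) none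
      else mask) (pvPm s.length q)
    = pvPm s.length (fun i => q i || pvCoverSize counter s w i) := by
  rw [pvStepGen w
      (fun a => PySem.Dict.get? (pvSizeOf counter) (PySem.Str.join " " ((s.drop a).take w)) == some (w : Int))
      _ ?_ q]
  · rfl
  · intro q a ha
    rw [PySem.List.slice_natCast_add]
    by_cases hc : PySem.Dict.get? (pvSizeOf counter) (PySem.Str.join " " (List.take w (List.drop a s))) == some (w : Int)
    · rw [if_pos hc, PySem.List.pyRepeat_singleton]
      simp only [Int.toNat_natCast]
      rw [pvMarkSlice w a q ha]
      exact pvPm_congr (fun i _ => by simp [hc])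
    · rw [if_neg (by simpa using hc)]
      exact pvPm_congr (fun i _ => by simp [Bool.eq_false_iff.mpr hc])

-- outer fold over keys (A)
lemma pvKeysFold (s : List String) (L : List String) (q : Nat → Bool) :
    L.foldl (fun mask key =>
      (PySem.List.pyRange 0 ((s.length : Int) - (pvSz key : Int)) 1).foldl (fun mask ws =>
        if PySem.Str.join " " (PySem.List.slice s (some ws) (some (ws + (pvSz key : Int)))) == key then
          (PySem.List.pyRange ws (ws + (pvSz key : Int)) 1).foldl
            (fun mask idx => PySem.List.pySetD mask idx 1) mask
        else mask) mask) (pvPm s.length q)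
    = pvPm s.length (fun i => q i || L.any (fun k => pvCoverKey s k i)) := by
  induction L generalizing q with
  | nil => exact pvPm_congr (fun i _ => by simp)
  | cons k t ih =>
      simp only [List.foldl_cons]
      rw [pvStepKeyA s k q, ih]
      exact pvPm_congr (fun i _ => by simp [Bool.or_assoc])

-- outer fold over distinct sizes (B); every size is a Nat cast
lemma pvSizesFold (counter : List (String × Int)) (s : List String) (S : List Int)
    (hS : ∀ w ∈ S, 0 ≤ w) (q : Nat → Bool) :
    S.foldl (fun mask w =>
      (PySem.List.pyRange 0 ((s.length : Int) - w) 1).foldl (fun mask start =>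
        if PySem.Dict.get? (pvSizeOf counter)
            (PySem.Str.join " " (PySem.List.slice s (some start) (some (start + w)))) == some w then
          PySem.List.slice mask none (some start) ++ PySem.List.pyRepeat [(1 : Int)] w ++
            PySem.List.slice mask (some (start + w)) none
        else mask) mask) (pvPm s.length q)
    = pvPm s.length (fun i => q i || S.any (fun w => pvCoverSize counter s w.toNat i)) := by
  induction S generalizing q with
  | nil => exact pvPm_congr (fun i _ => by simp)
  | cons w t ih =>
      simp only [List.foldl_cons]
      have hw : w = ((w.toNat : Nat) : Int) := (Int.toNat_of_nonneg (hS w (by simp))).symm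
      rw [hw, pvStepSizeB counter s w.toNat q, ih (fun x hx => hS x (by simp [hx]))]
      exact pvPm_congr (fun i _ => by simp [Bool.or_assoc, ← hw])

-- characterization of B's size dictionary
lemma pvSizeOf_items (counter : List (String × Int)) :
    (pvSizeOf counter).items
      = (PySem.Dict.ofList counter).keys.map (fun k => (k, (pvSz k : Int))) := by
  unfold pvSizeOf
  rw [show (fun (d : PySem.Dict String Int) (key : String) => d.insert key (pvSz key : Int))
        = (fun (d : PySem.Dict String Int) (a : String) => d.insert (id a) ((fun k => (pvSz k : Int)) a)) from rfl]
  rw [PySem.Dict.items_foldl_insert_fresh _ id (fun k => (pvSz k : Int)) PySem.Dict.empty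
    (fun a _ => by simp [PySem.Dict.contains_empty])
    (by simp [PySem.Dict.nodup_keys_ofList counter])]
  simp [PySem.Dict.empty]

lemma pvSizeOf_nodup (counter : List (String × Int)) : (pvSizeOf counter).keys.Nodup := by
  unfold pvSizeOf
  exact PySem.Dict.nodup_keys_foldl_insert _ _ _ (by simp [PySem.Dict.empty, PySem.Dict.keys])

lemma pvSizeOf_get? (counter : List (String × Int)) (p : String) (v : Int) :
    PySem.Dict.get? (pvSizeOf counter) p = some v
      ↔ p ∈ (PySem.Dict.ofList counter).keys ∧ v = (pvSz p : Int) := by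
  rw [PySem.Dict.get?_eq_some_iff_mem_items _ _ _ (pvSizeOf_nodup counter), pvSizeOf_items]
  simp only [List.mem_map, Prod.mk.injEq]
  constructor
  · rintro ⟨k, hk, rfl, rfl⟩; exact ⟨hk, rfl⟩
  · rintro ⟨hp, rfl⟩; exact ⟨p, hp, rfl, rfl⟩

lemma pvSizeOf_values (counter : List (String × Int)) :
    (pvSizeOf counter).values = (PySem.Dict.ofList counter).keys.map (fun k => (pvSz k : Int)) := by
  have h := pvSizeOf_items counter
  unfold PySem.Dict.values
  rw [h, List.map_map]
  rfl

-- the bridge: B's size-grouped cover equals A's per-key cover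
lemma pvCoverBridge (counter : List (String × Int)) (s : List String) (i : Nat) :
    (PySem.Set.ofList (pvSizeOf counter).values).any (fun w => pvCoverSize counter s w.toNat i)
      = pvCovers s counter i := by
  rw [Bool.eq_iff_iff]
  simp only [List.any_eq_true, pvCovers, pvCoverKey, pvCoverSize, pvMatch,
    PySem.Set.mem_ofList, pvSizeOf_values, List.mem_map, Bool.and_eq_true, decide_eq_true_eq,
    List.mem_range]
  constructor
  · rintro ⟨w, ⟨k, hk, rfl⟩, a, ha, ⟨h0, h1, h2⟩, hget⟩
    simp only [Int.toNat_natCast] at h0 h1 h2 hget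
    rw [beq_iff_eq, pvSizeOf_get?] at hget
    obtain ⟨hmem, hsz⟩ := hget
    have hszeq : pvSz (PySem.Str.join " " (List.take (pvSz k) (List.drop a s))) = pvSz k := by
      exact_mod_cast hsz.symm
    refine ⟨PySem.Str.join " " (List.take (pvSz k) (List.drop a s)), hmem, a, ha,
      ⟨by rw [hszeq]; omega, by omega, by rw [hszeq]; omega⟩, ?_⟩
    rw [hszeq]
    simp
  · rintro ⟨k, hk, a, ha, ⟨h0, h1, h2⟩, hmatch⟩
    rw [beq_iff_eq] at hmatch
    refine ⟨(pvSz k : Int), ⟨k, hk, rfl⟩, a, ha, ?_, ?_⟩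
    · simp only [Int.toNat_natCast]; exact ⟨h0, h1, h2⟩
    · simp only [Int.toNat_natCast, hmatch]
      rw [beq_iff_eq, pvSizeOf_get?]
      exact ⟨hk, rfl⟩

-- both initial masks are the all-(-1) pointwise mask
lemma pvInitA (n : Nat) :
    (PySem.List.pyRange 0 (n : Int) 1).map (fun _ => (-1 : Int)) = pvPm n (fun _ => false) := by
  rw [PySem.List.pyRange_zero_natCast, List.map_map]
  rfl

lemma pvInitB (n : Nat) :
    PySem.List.pyRepeat [(-1 : Int)] (n : Int) = pvPm n (fun _ => false) := by
  rw [PySem.List.pyRepeat_singleton, Int.toNat_natCast]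
  apply List.ext_getElem <;> simp [pvPm]

-- per-sentence: A's value
lemma pvSentenceA (counter : List (String × Int)) (s : List String) :
    (PySem.Dict.ofList counter).keys.foldl (fun mask key =>
      (PySem.List.pyRange 0 ((s.length : Int) - (pvSz key : Int)) 1).foldl (fun mask ws =>
        if PySem.Str.join " " (PySem.List.slice s (some ws) (some (ws + (pvSz key : Int)))) == key then
          (PySem.List.pyRange ws (ws + (pvSz key : Int)) 1).foldl
            (fun mask idx => PySem.List.pySetD mask idx 1) mask
        else mask) mask) ((PySem.List.pyRange 0 (s.length : Int) 1).map (fun _ => (-1 : Int)))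
    = pvPm s.length (pvCovers s counter) := by
  rw [pvInitA, pvKeysFold]
  exact pvPm_congr (fun i _ => by simp [pvCovers])

-- per-sentence: B's value
lemma pvSentenceB (counter : List (String × Int)) (s : List String) :
    (PySem.Set.ofList (pvSizeOf counter).values : List Int).foldl (fun mask w =>
      (PySem.List.pyRange 0 ((s.length : Int) - w) 1).foldl (fun mask start =>
        if PySem.Dict.get? (pvSizeOf counter)
            (PySem.Str.join " " (PySem.List.slice s (some start) (some (start + w)))) == some w then
          PySem.List.slice mask none (some start) ++ PySem.List.pyRepeat [(1 : Int)] w ++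
            PySem.List.slice mask (some (start + w)) none
        else mask) mask) (PySem.List.pyRepeat [(-1 : Int)] (s.length : Int))
    = pvPm s.length (pvCovers s counter) := by
  rw [pvInitB, pvSizesFold counter s _ ?_]
  · exact pvPm_congr (fun i _ => by simp [pvCoverBridge])
  · intro w hw
    rw [PySem.Set.mem_ofList, pvSizeOf_values, List.mem_map] at hw
    obtain ⟨k, -, hkw⟩ := hw
    rw [← hkw]
    positivity

-- ===== VERDICT (by name: the statement is the Claim_ definition above) =====
theorem make_sentence_mask_spec : Claim_equal_make_sentence_mask := by
  intro document counter _
  unfold Spec_make_sentence_mask make_sentence_mask make_sentence_mask_alt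
  rw [PySem.List.foldl_append_singleton_eq_map, PySem.List.foldl_append_singleton_eq_map]
  simp only [List.nil_append]
  apply List.map_congr_left
  intro s _
  have hfold : (List.foldl (fun (d : PySem.Dict String Int) key => d.insert key (pvSz key : Int))
      PySem.Dict.empty (PySem.Dict.ofList counter).keys) = pvSizeOf counter := rfl
  rw [hfold, pvSentenceA counter s, pvSentenceB counter s]
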